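-- pv_equiv track=rewrite | github.com/talathom/GraphicsLab2 | exercise1.py | boogle
-- ===== SOURCE A (Python) =====
-- def boogle(words):
-- 	points = 0
-- 	for i in range(0, len(words)):
-- 		if len(words[i]) <= 4:
-- 			points += 1
-- 		elif len(words[i]) == 5:
-- 			points += 2
-- 		elif len(words[i]) == 6:
-- 			points += 3
-- 		elif len(words[i]) == 7:
-- 			points += 5
-- 		elif len(words[i]) > 7:
-- 			points += 11
-- 	return points
-- ===== SOURCE B (Python) =====
-- def boogle(words):
--     # Histogram approach: bucket word lengths once, then score each distinct length.
--     lengths = [len(w) for w in words]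
--     freq = {}
--     for L in lengths:
--         freq[L] = freq.get(L, 0) + 1
--     total = 0
--     for L, c in freq.items():
--         if L <= 4:
--             p = 1
--         elif L == 5:
--             p = 2
--         elif L == 6:
--             p = 3
--         elif L == 7:
--             p = 5
--         else:
--             p = 11
--         total += c * p
--     return total
-- ===== Notes on version B (the rewrite author's own statement) =====
-- stated objective: alternative
-- what changed: B replaces A's per-word index loop with a two-pass histogram: it builds a frequency table of word lengths, then scores each distinct length once, accumulating count*points.
import Mathlib
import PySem

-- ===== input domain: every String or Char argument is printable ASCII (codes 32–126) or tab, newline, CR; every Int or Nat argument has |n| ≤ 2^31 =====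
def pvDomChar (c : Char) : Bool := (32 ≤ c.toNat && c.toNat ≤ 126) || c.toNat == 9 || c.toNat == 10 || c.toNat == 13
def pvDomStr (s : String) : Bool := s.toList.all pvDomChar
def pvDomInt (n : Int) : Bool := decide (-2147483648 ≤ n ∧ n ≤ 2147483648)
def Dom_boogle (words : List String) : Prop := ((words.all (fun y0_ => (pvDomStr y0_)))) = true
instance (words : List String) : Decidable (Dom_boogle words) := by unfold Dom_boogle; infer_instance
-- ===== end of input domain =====

-- B replaces A's per-word index loop with a two-pass histogram of word lengths (alternative decomposition, same cost).


-- ===== PORT A =====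
def boogle (words : List String) : Int :=
  (PySem.List.pyRange 0 (PySem.List.len words)).foldl
    (fun points i =>
      let lw := PySem.Str.len (PySem.List.pyGetD words i "")
      if lw ≤ 4 then points + 1
      else if lw = 5 then points + 2
      else if lw = 6 then points + 3
      else if lw = 7 then points + 5
      else if lw > 7 then points + 11
      else points)
    0

-- ===== PORT B =====
def booglePoints (L : Int) : Int :=
  if L ≤ 4 then 1
  else if L = 5 then 2
  else if L = 6 then 3
  else if L = 7 then 5
  else 11

def boogle_alt (words : List String) : Int :=
  let lengths := words.map (fun w => PySem.Str.len w)
  let freq : PySem.Dict Int Int :=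
    lengths.foldl (fun d L => d.insert L (d.getD L 0 + 1)) PySem.Dict.empty
  freq.items.foldl (fun total p => total + p.2 * booglePoints p.1) 0

-- ===== PRECONDITION & SPEC =====
def Spec_boogle (words : List String) (out : Int) : Prop := out = boogle_alt words
instance (words : List String) (out : Int) : Decidable (Spec_boogle words out) := by unfold Spec_boogle; infer_instance

-- ===== CLAIM (what is proved, stated in full; the proofs are below) =====
def Claim_equal_boogle : Prop := ∀ (words : List String), Dom_boogle words → Spec_boogle words (boogle words)

-- ===== LEMMAS AND PROOFS =====

-- A's if-chain adds exactly booglePoints of the tested length.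
theorem boogle_chain_eq (points lw : Int) :
    (if lw ≤ 4 then points + 1
     else if lw = 5 then points + 2
     else if lw = 6 then points + 3
     else if lw = 7 then points + 5
     else if lw > 7 then points + 11
     else points) = points + booglePoints lw := by
  unfold booglePoints
  split_ifs <;> omega

-- A computes the sum of booglePoints over the word lengths.
theorem boogle_eq_sum (words : List String) :
    boogle words = ((words.map (fun w => booglePoints (PySem.Str.len w))).sum) := by
  simp only [boogle]
  rw [PySem.List.foldl_pyRange_pyGetD words ""
    (fun points lw' =>
      if PySem.Str.len lw' ≤ 4 then points + 1
      else if PySem.Str.len lw' = 5 then points + 2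
      else if PySem.Str.len lw' = 6 then points + 3
      else if PySem.Str.len lw' = 7 then points + 5
      else if PySem.Str.len lw' > 7 then points + 11
      else points) 0 le_rfl]
  simp only [Int.toNat_zero, List.drop_zero]
  have hcongr : ∀ (acc : Int) (w : String), w ∈ words →
      (if PySem.Str.len w ≤ 4 then acc + 1
       else if PySem.Str.len w = 5 then acc + 2
       else if PySem.Str.len w = 6 then acc + 3
       else if PySem.Str.len w = 7 then acc + 5
       else if PySem.Str.len w > 7 then acc + 11
       else acc) = acc + booglePoints (PySem.Str.len w) :=
    fun acc w _ => boogle_chain_eq acc _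
  exact (PySem.List.foldl_congr_mem words _ _ 0 hcongr).trans (by rw [PySem.List.foldl_add]; simp)

-- summing count k * f k over the distinct elements equals summing f over the list
theorem sum_count_mul (xs : List Int) (f : Int → Int) :
    ((PySem.Set.ofList xs).map (fun k => (xs.count k : Int) * f k)).sum = (xs.map f).sum := by
  have hnd : (PySem.Set.ofList xs).Nodup := PySem.Set.nodup_ofList xs
  have hfin : (PySem.Set.ofList xs).toFinset = xs.toFinset := by
    ext k; simp [PySem.Set.mem_ofList]
  calc ((PySem.Set.ofList xs).map (fun k => (xs.count k : Int) * f k)).sum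
      = ∑ k ∈ (PySem.Set.ofList xs).toFinset, (xs.count k : Int) * f k := by
        rw [List.sum_toFinset _ hnd]
    _ = ∑ k ∈ xs.toFinset, xs.count k • f k := by
        rw [hfin]; simp
    _ = (xs.map f).sum := (Finset.sum_list_map_count xs f).symm

-- B computes the same sum.
theorem boogle_alt_eq_sum (words : List String) :
    boogle_alt words = ((words.map (fun w => booglePoints (PySem.Str.len w))).sum) := by
  simp only [boogle_alt]
  rw [PySem.Dict.foldl_insert_getD_add_one_eq_counter, PySem.Dict.items_counter,
    PySem.List.foldl_add (g := fun p : Int × Int => p.2 * booglePoints p.1)]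
  simp only [List.map_map, Function.comp_def, zero_add]
  rw [sum_count_mul (words.map (fun w => PySem.Str.len w)) booglePoints, List.map_map]
  rfl

-- ===== VERDICT (by name: the statement is the Claim_ definition above) =====
theorem boogle_spec : Claim_equal_boogle := by
  intro words _
  unfold Spec_boogle
  rw [boogle_eq_sum, boogle_alt_eq_sum]
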